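-- pv_equiv track=rewrite | github.com/tnpfldyd/TIL | 백준/Gold/2632. 피자판매/피자판매.py | get_case
-- ===== SOURCE A (Python) =====
-- from collections import defaultdict
--
-- def get_case(p, l):
--     dic = defaultdict(int)
--     for i in range(l):
--         arr = p[i:] + p[:i]
--         sums = 0
--         for number in arr:
--             sums += number
--             dic[sums] += 1
--     dic[sum(p)] = 1
--     return dic
-- ===== SOURCE B (Python) =====
-- from collections import defaultdict
--
-- def get_case(p, l):
--     # Prefix sums over the doubled list: every arc sum is a difference pref[s+j]-pref[s],
--     # so no rotated list is materialised and no running re-accumulation per start is done.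
--     n = len(p)
--     pref = [0]
--     acc = 0
--     for x in p + p:
--         acc += x
--         pref.append(acc)
--     dic = defaultdict(int)
--     for i in range(l):
--         s = min(i, n)  # p[i:]+p[:i] == p for i >= n, i.e. start clamps to n in the doubled array
--         for j in range(1, n + 1):
--             dic[pref[s + j] - pref[s]] += 1
--     dic[pref[n]] = 1
--     return dic
-- ===== Notes on version B (the rewrite author's own statement) =====
-- stated objective: alternative
-- what changed: B precomputes one prefix-sum array over the doubled list p+p and reads each arc sum as a difference pref[s+j]-pref[s], instead of A's materialising a rotated copy of the list and re-accumulating a running sum for every start.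
import Mathlib
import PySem

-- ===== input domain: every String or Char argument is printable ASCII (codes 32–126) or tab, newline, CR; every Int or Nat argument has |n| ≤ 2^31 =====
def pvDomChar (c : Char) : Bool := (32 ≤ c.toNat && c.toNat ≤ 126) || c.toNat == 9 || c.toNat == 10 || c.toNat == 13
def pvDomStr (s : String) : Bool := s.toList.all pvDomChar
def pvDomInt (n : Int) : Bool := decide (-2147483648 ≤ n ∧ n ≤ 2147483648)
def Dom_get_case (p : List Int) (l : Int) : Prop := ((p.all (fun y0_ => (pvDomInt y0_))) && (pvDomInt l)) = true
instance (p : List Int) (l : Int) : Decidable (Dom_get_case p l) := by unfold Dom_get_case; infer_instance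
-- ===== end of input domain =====

-- B replaces A's per-start rotated list and running re-accumulation by one prefix-sum
-- array over the doubled list, reading each arc sum as a difference of two entries
-- (objective: alternative/idiomatic; same loop count, no per-start list building).

-- ===== PORT A =====
def get_case (p : List Int) (l : Int) : List (Int × Int) :=
  let dic : PySem.Dict Int Int := PySem.Dict.empty
  let dic := (PySem.List.pyRange 0 l 1).foldl (fun dic i =>
    let arr := PySem.List.slice p (some i) none ++ PySem.List.slice p none (some i)
    (arr.foldl (fun (st : Int × PySem.Dict Int Int) number =>
      (st.1 + number, st.2.modify (st.1 + number) 0 (· + 1))) (0, dic)).2) dic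
  let dic := dic.insert (p.foldl (· + ·) 0) 1
  dic.items

-- ===== PORT B =====
-- indices pref[s+j], pref[s], pref[n] are always in range (pref has 2*n+1 entries,
-- 0 ≤ s ≤ n, 1 ≤ j ≤ n), so Python never raises here; pyGetD's default is never used.
def get_case_alt (p : List Int) (l : Int) : List (Int × Int) :=
  let n : Int := p.length
  let pref := ((p ++ p).foldl (fun (st : Int × List Int) x =>
    (st.1 + x, st.2 ++ [st.1 + x])) (0, [0])).2
  let dic := (PySem.List.pyRange 0 l 1).foldl (fun (dic : PySem.Dict Int Int) i =>
    let s := min i n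
    (PySem.List.pyRange 1 (n + 1) 1).foldl (fun dic j =>
      dic.modify (PySem.List.pyGetD pref (s + j) 0 - PySem.List.pyGetD pref s 0) 0 (· + 1)) dic)
    PySem.Dict.empty
  let dic := dic.insert (PySem.List.pyGetD pref n 0) 1
  dic.items

-- ===== PRECONDITION & SPEC =====
def Spec_get_case (p : List Int) (l : Int) (out : List (Int × Int)) : Prop := out = get_case_alt p l
instance (p : List Int) (l : Int) (out : List (Int × Int)) : Decidable (Spec_get_case p l out) := by unfold Spec_get_case; infer_instance

-- ===== CLAIM (what is proved, stated in full; the proofs are below) =====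
def Claim_equal_get_case : Prop := ∀ (p : List Int) (l : Int), Dom_get_case p l → Spec_get_case p l (get_case p l)

-- ===== LEMMAS AND PROOFS =====

/-- The list of running prefix sums of `xs` started at `s0` (without `s0` itself). -/
def psums : List Int → Int → List Int
  | [], _ => []
  | x :: xs, s0 => (s0 + x) :: psums xs (s0 + x)

theorem psums_length (xs : List Int) (s0 : Int) : (psums xs s0).length = xs.length := by
  induction xs generalizing s0 with
  | nil => rfl
  | cons x xs ih => simp [psums, ih]

theorem psums_getElem (xs : List Int) (s0 : Int) (k : Nat) (hk : k < xs.length) :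
    (psums xs s0)[k]'(by rw [psums_length]; exact hk) = s0 + (xs.take (k + 1)).sum := by
  induction xs generalizing s0 k with
  | nil => simp at hk
  | cons x xs ih =>
    cases k with
    | zero => simp [psums]
    | succ k =>
      simp only [psums, List.getElem_cons_succ]
      rw [ih (s0 + x) k (by simpa using hk)]
      simp [List.sum_cons, add_assoc]

/-- `pref` lookup: entry `k` of the prefix list is the sum of the first `k` elements. -/
theorem prefList_getD (q : List Int) (k : Nat) (hk : k ≤ q.length) :
    (0 :: psums q 0).getD k 0 = (q.take k).sum := by
  cases k with
  | zero => simp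
  | succ k =>
    have hk' : k < q.length := by omega
    have : (psums q 0).getD k 0 = (psums q 0)[k]'(by rw [psums_length]; exact hk') :=
      List.getD_eq_getElem _ _ _
    simp only [List.getD_cons_succ, this, psums_getElem q 0 k hk']
    simp

/-- A's inner loop: the dict component is a fold of increments over the prefix sums. -/
theorem innerA (arr : List Int) (s0 : Int) (d : PySem.Dict Int Int) :
    (arr.foldl (fun (st : Int × PySem.Dict Int Int) number =>
      (st.1 + number, st.2.modify (st.1 + number) 0 (· + 1))) (s0, d)).2
    = (psums arr s0).foldl (fun d k => d.modify k 0 (· + 1)) d := by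
  induction arr generalizing s0 d with
  | nil => rfl
  | cons x xs ih => simp [psums, ih]

/-- B's prefix list builder produces `acc ++ psums q s0`. -/
theorem prefBuild (q : List Int) (s0 : Int) (acc : List Int) :
    (q.foldl (fun (st : Int × List Int) x => (st.1 + x, st.2 ++ [st.1 + x])) (s0, acc)).2
    = acc ++ psums q s0 := by
  induction q generalizing s0 acc with
  | nil => simp [psums]
  | cons x xs ih => simp [psums, ih]

/-- Rotation = window of length `n` in the doubled list, with start clamped to `n`. -/
theorem rotEq (p : List Int) (m : Nat) :
    p.drop m ++ p.take m = ((p ++ p).drop (min m p.length)).take p.length := by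
  by_cases h : m ≤ p.length
  · rw [min_eq_left h, List.drop_append_of_le_length h, List.take_append]
    have h1 : (p.drop m).length = p.length - m := by simp
    congr 1
    · exact (List.take_of_length_le (by simp)).symm
    · rw [h1]
      congr 1
      omega
  · rw [min_eq_right (by omega)]
    have h2 : (p ++ p).drop p.length = p := by simp
    rw [h2, List.drop_eq_nil_of_le (by omega), List.take_of_length_le (by omega),
      List.take_of_length_le le_rfl]
    simp

/-- The sum of a window of `q` is a difference of prefix sums. -/
theorem windowSum (q : List Int) (a b : Nat) :
    ((q.drop a).take b).sum = (q.take (a + b)).sum - (q.take a).sum := by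
  rw [List.take_add, List.sum_append]
  ring

/-- The key sequence of A's iteration `i` equals B's key sequence. -/
theorem keysEq (p : List Int) (i : Int) (hi : 0 ≤ i) :
    psums (PySem.List.slice p (some i) none ++ PySem.List.slice p none (some i)) 0
    = (PySem.List.pyRange 1 ((p.length : Int) + 1) 1).map (fun j =>
        PySem.List.pyGetD (0 :: psums (p ++ p) 0) (min i (p.length : Int) + j) 0
        - PySem.List.pyGetD (0 :: psums (p ++ p) 0) (min i (p.length : Int)) 0) := by
  set n : Nat := p.length with hn
  set m : Nat := i.toNat with hm
  have him : i = (m : Int) := by omega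
  set s : Nat := min m n with hsdef
  have hs : min ((m : Nat) : Int) ((n : Nat) : Int) = ((s : Nat) : Int) := by
    rw [hsdef]; push_cast; rfl
  have hsn : s ≤ n := by omega
  rw [him, PySem.List.slice_from_natCast, PySem.List.slice_to_natCast, rotEq p m, hs]
  apply List.ext_getElem
  · simp [psums_length, PySem.List.length_pyRange_one]
    omega
  · intro k hk1 hk2
    have hkn : k < n := by
      have := psums_length (((p ++ p).drop (min m p.length)).take p.length) 0
      rw [this] at hk1
      simp at hk1
      omega
    have harrlen : (((p ++ p).drop (min m p.length)).take p.length).length = n := by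
      simp; omega
    rw [psums_getElem _ 0 k (by rw [harrlen]; exact hkn)]
    rw [List.getElem_map]
    have hj : (PySem.List.pyRange 1 ((n : Int) + 1) 1)[k]'(by
        rw [PySem.List.length_pyRange_one]; omega) = 1 + (k : Int) := by
      rw [PySem.List.getElem_pyRange_one]
    rw [hj]
    have hidx1 : ((s : Int) + (1 + (k : Int))) = ((s + k + 1 : Nat) : Int) := by push_cast; ring
    rw [hidx1, PySem.List.pyGetD_natCast, PySem.List.pyGetD_natCast]
    rw [prefList_getD (p ++ p) (s + k + 1) (by simp; omega),
        prefList_getD (p ++ p) s (by simp; omega)]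
    -- LHS: sum of first k+1 elements of the window
    have htake : (((p ++ p).drop (min m p.length)).take p.length).take (k + 1)
        = ((p ++ p).drop s).take (k + 1) := by
      rw [List.take_take]
      congr 1
      omega
    rw [htake, windowSum]
    have : s + (k + 1) = s + k + 1 := by omega
    rw [this]
    ring

/-- Sum of the first `n = p.length` entries of `p ++ p` is the sum of `p`. -/
theorem takeSum (p : List Int) : ((p ++ p).take p.length).sum = p.sum := by
  simp

-- ===== VERDICT (by name: the statement is the Claim_ definition above) =====
theorem get_case_spec : Claim_equal_get_case := by
  intro p l _
  unfold Spec_get_case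
  show get_case p l = get_case_alt p l
  unfold get_case get_case_alt
  rw [prefBuild]
  simp only [List.singleton_append]
  -- final key equality
  have hfin : p.foldl (· + ·) 0
      = PySem.List.pyGetD (0 :: psums (p ++ p) 0) ((p.length : Int)) 0 := by
    rw [PySem.List.pyGetD_natCast, prefList_getD (p ++ p) p.length (by simp)]
    rw [takeSum, List.sum_eq_foldl]
  rw [hfin]
  congr 1
  congr 1
  apply PySem.List.foldl_congr_mem'
  intro i hi d
  have hi' : 0 ≤ i ∧ i < l := by
    rw [PySem.List.mem_pyRange_one] at hi
    exact hi
  rw [innerA, keysEq p i hi'.1, List.foldl_map]
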